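-- pv_equiv track=rewrite | github.com/luisdapreci/PowerPlatformDocGen | src/main.py | _separate_critical_files
-- ===== SOURCE A (Python) =====
-- from typing import List, Dict, Optional
--
-- def _separate_critical_files(prioritized_files: List[tuple]) -> tuple:
--     """
--     Separate critical files (Power Fx formulas, workflows) from non-critical files.
--     Returns (critical_files, non_critical_files) where each is a list of (path, content) tuples.
--     """
--     critical_files = []
--     non_critical_files = []
--
--     canvas_files = []          # .fx.yaml Power Fx screen formulas
--     dataverse_formulas = []     # Formulas/*.yaml calculated columns
--     dataverse_xaml = []         # Formulas/*.xaml rollup/BPF definitions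
--     cloud_flows = []            # Workflows/*.json Power Automate
--     classic_workflows = []      # Workflows/*.xaml business rules
--
--     for path, content in prioritized_files:
--         path_lower = path.lower()
--
--         if '.fx.yaml' in path_lower:
--             canvas_files.append((path, content))
--         elif 'formulas/' in path_lower and path_lower.endswith('.yaml'):
--             dataverse_formulas.append((path, content))
--         elif 'formulas/' in path_lower and path_lower.endswith('.xaml'):
--             dataverse_xaml.append((path, content))
--         elif 'workflows' in path_lower and path_lower.endswith('.json') and 'connectionreferences' not in path_lower:
--             cloud_flows.append((path, content))
--         elif 'workflows' in path_lower and path_lower.endswith('.xaml'):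
--             classic_workflows.append((path, content))
--         else:
--             non_critical_files.append((path, content))
--
--     # Order: Canvas screens → Dataverse formulas → Cloud flows → Classic workflows
--     # Canvas screens give the most insight about business logic.
--     # Dataverse formulas define server-side computed columns.
--     # Cloud flows contain automation logic.
--     # Classic workflows/business rules are supplementary automation.
--     critical_files = canvas_files + dataverse_formulas + dataverse_xaml + cloud_flows + classic_workflows
--
--     return critical_files, non_critical_files
-- ===== SOURCE B (Python) =====
-- def _separate_critical_files(prioritized_files):
--     """
--     Separate critical files (Power Fx formulas, workflows) from non-critical files.
--     Returns (critical_files, non_critical_files) where each is a list of (path, content) tuples.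
--
--     Re-implementation: one standalone predicate per critical bucket (the elif-chain
--     priorities folded into each predicate; mutually exclusive suffixes need no extra
--     exclusions), then one filter pass per bucket and a complement pass.
--     """
--     def is_canvas(q):
--         return '.fx.yaml' in q
--
--     def is_dataverse_formula(q):
--         return '.fx.yaml' not in q and 'formulas/' in q and q.endswith('.yaml')
--
--     def is_dataverse_xaml(q):
--         return '.fx.yaml' not in q and 'formulas/' in q and q.endswith('.xaml')
--
--     def is_cloud_flow(q):
--         return ('.fx.yaml' not in q and 'workflows' in q and q.endswith('.json')
--                 and 'connectionreferences' not in q)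
--
--     def is_classic_workflow(q):
--         return ('.fx.yaml' not in q and 'formulas/' not in q
--                 and 'workflows' in q and q.endswith('.xaml'))
--
--     buckets = [is_canvas, is_dataverse_formula, is_dataverse_xaml,
--                is_cloud_flow, is_classic_workflow]
--     tagged = [(path, content, path.lower()) for path, content in prioritized_files]
--     critical_files = [(p, c) for pred in buckets for p, c, q in tagged if pred(q)]
--     non_critical_files = [(p, c) for p, c, q in tagged
--                           if not any(pred(q) for pred in buckets)]
--     return critical_files, non_critical_files
-- ===== Notes on version B (the rewrite author's own statement) =====
-- stated objective: alternative
-- what changed: Replaces the single accumulator loop with five mutually-exclusive per-bucket predicates (the elif priorities folded into each predicate, redundant exclusions dropped since .yaml/.xaml/.json suffixes are mutually exclusive), one filter pass per bucket and a complement pass for non-critical files.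
import Mathlib
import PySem

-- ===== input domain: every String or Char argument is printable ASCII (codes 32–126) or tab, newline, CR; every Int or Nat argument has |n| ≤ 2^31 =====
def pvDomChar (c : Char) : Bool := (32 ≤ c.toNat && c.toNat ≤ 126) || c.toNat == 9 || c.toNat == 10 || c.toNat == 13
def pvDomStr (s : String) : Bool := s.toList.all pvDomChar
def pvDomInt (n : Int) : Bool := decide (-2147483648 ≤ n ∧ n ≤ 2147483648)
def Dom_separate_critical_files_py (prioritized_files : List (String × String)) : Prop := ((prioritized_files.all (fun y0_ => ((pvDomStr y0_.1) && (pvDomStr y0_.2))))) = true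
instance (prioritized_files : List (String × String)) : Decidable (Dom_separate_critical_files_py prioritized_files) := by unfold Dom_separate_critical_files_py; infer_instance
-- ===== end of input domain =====

-- B replaces A's single accumulator loop by five standalone per-bucket filter passes
-- plus a complement pass (alternative decomposition; same cost).


-- ===== PORT A =====
-- A's raw branch conditions, in source order (on the lowered path)
def pvA0 (q : String) : Bool := PySem.Str.isIn ".fx.yaml" q
def pvA1 (q : String) : Bool := PySem.Str.isIn "formulas/" q && PySem.Str.endswith q ".yaml"
def pvA2 (q : String) : Bool := PySem.Str.isIn "formulas/" q && PySem.Str.endswith q ".xaml"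
def pvA3 (q : String) : Bool := PySem.Str.isIn "workflows" q && PySem.Str.endswith q ".json" && !PySem.Str.isIn "connectionreferences" q
def pvA4 (q : String) : Bool := PySem.Str.isIn "workflows" q && PySem.Str.endswith q ".xaml"

-- the six-bucket loop state: canvas, dataverse_formulas, dataverse_xaml, cloud_flows, classic_workflows, non_critical
def pvStepA (st : List (String × String) × List (String × String) × List (String × String) × List (String × String) × List (String × String) × List (String × String))
    (pc : String × String) :
    List (String × String) × List (String × String) × List (String × String) × List (String × String) × List (String × String) × List (String × String) :=
  match st with
  | (cv, dvf, dvx, cf, cw, nc) =>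
    let pl := PySem.Str.lower pc.1
    if pvA0 pl then (cv ++ [pc], dvf, dvx, cf, cw, nc)
    else if pvA1 pl then (cv, dvf ++ [pc], dvx, cf, cw, nc)
    else if pvA2 pl then (cv, dvf, dvx ++ [pc], cf, cw, nc)
    else if pvA3 pl then (cv, dvf, dvx, cf ++ [pc], cw, nc)
    else if pvA4 pl then (cv, dvf, dvx, cf, cw ++ [pc], nc)
    else (cv, dvf, dvx, cf, cw, nc ++ [pc])

def separate_critical_files_py (prioritized_files : List (String × String)) : (List (String × String)) × (List (String × String)) :=
  match prioritized_files.foldl pvStepA ([], [], [], [], [], []) with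
  | (cv, dvf, dvx, cf, cw, nc) => (cv ++ dvf ++ dvx ++ cf ++ cw, nc)

-- ===== PORT B =====
-- B's standalone bucket predicates (on the lowered path)
def pvIsCanvas (q : String) : Bool := PySem.Str.isIn ".fx.yaml" q
def pvIsDvFormula (q : String) : Bool := !PySem.Str.isIn ".fx.yaml" q && PySem.Str.isIn "formulas/" q && PySem.Str.endswith q ".yaml"
def pvIsDvXaml (q : String) : Bool := !PySem.Str.isIn ".fx.yaml" q && PySem.Str.isIn "formulas/" q && PySem.Str.endswith q ".xaml"
def pvIsCloudFlow (q : String) : Bool := !PySem.Str.isIn ".fx.yaml" q && PySem.Str.isIn "workflows" q && PySem.Str.endswith q ".json" && !PySem.Str.isIn "connectionreferences" q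
def pvIsClassicWf (q : String) : Bool := !PySem.Str.isIn ".fx.yaml" q && !PySem.Str.isIn "formulas/" q && PySem.Str.isIn "workflows" q && PySem.Str.endswith q ".xaml"

def pvBuckets : List (String → Bool) := [pvIsCanvas, pvIsDvFormula, pvIsDvXaml, pvIsCloudFlow, pvIsClassicWf]

def separate_critical_files_py_alt (prioritized_files : List (String × String)) : (List (String × String)) × (List (String × String)) :=
  let tagged := prioritized_files.map (fun pc => (pc.1, pc.2, PySem.Str.lower pc.1))
  let critical := pvBuckets.flatMap (fun pred => (tagged.filter (fun t => pred t.2.2)).map (fun t => (t.1, t.2.1)))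
  let non := (tagged.filter (fun t => !(pvBuckets.any (fun pred => pred t.2.2)))).map (fun t => (t.1, t.2.1))
  (critical, non)

-- ===== PRECONDITION & SPEC =====
def Spec_separate_critical_files_py (prioritized_files : List (String × String)) (out : (List (String × String)) × (List (String × String))) : Prop := out = separate_critical_files_py_alt prioritized_files
instance (prioritized_files : List (String × String)) (out : (List (String × String)) × (List (String × String))) : Decidable (Spec_separate_critical_files_py prioritized_files out) := by unfold Spec_separate_critical_files_py; infer_instance

-- ===== CLAIM =====
def Claim_equal_separate_critical_files_py : Prop := ∀ (prioritized_files : List (String × String)), Dom_separate_critical_files_py prioritized_files → Spec_separate_critical_files_py prioritized_files (separate_critical_files_py prioritized_files)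

-- ===== LEMMAS AND PROOFS =====

-- at most one of two distinct equal-length suffixes holds
theorem pvSuffix_disj (q s t : List Char) (hne : s ≠ t) (hlen : s.length = t.length)
    (hs : PySem.Chars.endswith q s = true) : PySem.Chars.endswith q t = false := by
  by_contra h
  rw [Bool.not_eq_false] at h
  have hs' := (PySem.Chars.endswith_iff q s).mp hs
  have ht' := (PySem.Chars.endswith_iff q t).mp h
  exact hne (List.IsSuffix.eq_of_length_le (List.suffix_of_suffix_length_le hs' ht' hlen.le) hlen.ge)

-- A's cascaded branch predicates (who lands in which bucket), as functions of the lowered path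
def pvQ0 (q : String) : Bool := pvA0 q
def pvQ1 (q : String) : Bool := !pvA0 q && pvA1 q
def pvQ2 (q : String) : Bool := !pvA0 q && !pvA1 q && pvA2 q
def pvQ3 (q : String) : Bool := !pvA0 q && !pvA1 q && !pvA2 q && pvA3 q
def pvQ4 (q : String) : Bool := !pvA0 q && !pvA1 q && !pvA2 q && !pvA3 q && pvA4 q
def pvQ5 (q : String) : Bool := !pvA0 q && !pvA1 q && !pvA2 q && !pvA3 q && !pvA4 q

-- loop invariant for A's fold
theorem pvFoldA (xs : List (String × String)) (cv dvf dvx cf cw nc : List (String × String)) :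
    xs.foldl pvStepA (cv, dvf, dvx, cf, cw, nc) =
      (cv ++ xs.filter (fun pc => pvQ0 (PySem.Str.lower pc.1)),
       dvf ++ xs.filter (fun pc => pvQ1 (PySem.Str.lower pc.1)),
       dvx ++ xs.filter (fun pc => pvQ2 (PySem.Str.lower pc.1)),
       cf ++ xs.filter (fun pc => pvQ3 (PySem.Str.lower pc.1)),
       cw ++ xs.filter (fun pc => pvQ4 (PySem.Str.lower pc.1)),
       nc ++ xs.filter (fun pc => pvQ5 (PySem.Str.lower pc.1))) := by
  induction xs generalizing cv dvf dvx cf cw nc with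
  | nil => simp
  | cons x xs ih =>
    simp only [List.foldl_cons]
    by_cases h0 : pvA0 (PySem.Str.lower x.1) = true <;>
    by_cases h1 : pvA1 (PySem.Str.lower x.1) = true <;>
    by_cases h2 : pvA2 (PySem.Str.lower x.1) = true <;>
    by_cases h3 : pvA3 (PySem.Str.lower x.1) = true <;>
    by_cases h4 : pvA4 (PySem.Str.lower x.1) = true <;>
    simp [pvStepA, pvQ0, pvQ1, pvQ2, pvQ3, pvQ4, pvQ5, h0, h1, h2, h3, h4, ih]

-- the tagged filter+project pass of B equals a direct filter
theorem pvTagged (xs : List (String × String)) (p : String → Bool) :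
    ((xs.map (fun pc => (pc.1, pc.2, PySem.Str.lower pc.1))).filter (fun t => p t.2.2)).map (fun t => (t.1, t.2.1))
      = xs.filter (fun pc => p (PySem.Str.lower pc.1)) := by
  induction xs with
  | nil => rfl
  | cons x xs ih =>
    by_cases h : p (PySem.Str.lower x.1) = true <;> simp [h, ih]

-- pointwise agreement of the cascaded predicates with B's standalone ones
theorem pvB0_eq (q : String) : pvIsCanvas q = pvQ0 q := rfl
theorem pvB1_eq (q : String) : pvIsDvFormula q = pvQ1 q := by
  simp [pvIsDvFormula, pvQ1, pvA0, pvA1, Bool.and_assoc]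
theorem pvB2_eq (q : String) : pvIsDvXaml q = pvQ2 q := by
  simp only [pvIsDvXaml, pvQ2, pvA0, pvA1, pvA2, PySem.Str.endswith_eq, PySem.Str.isIn_eq]
  by_cases hx : PySem.Chars.endswith q.toList ['.', 'x', 'a', 'm', 'l'] = true
  · have hy := pvSuffix_disj q.toList _ ['.', 'y', 'a', 'm', 'l'] (by decide) (by decide) hx
    simp [hx, hy]
  · simp [hx]
theorem pvB3_eq (q : String) : pvIsCloudFlow q = pvQ3 q := by
  simp only [pvIsCloudFlow, pvQ3, pvA0, pvA1, pvA2, pvA3, PySem.Str.endswith_eq, PySem.Str.isIn_eq]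
  by_cases hj : PySem.Chars.endswith q.toList ['.', 'j', 's', 'o', 'n'] = true
  · have hy := pvSuffix_disj q.toList _ ['.', 'y', 'a', 'm', 'l'] (by decide) (by decide) hj
    have hx := pvSuffix_disj q.toList _ ['.', 'x', 'a', 'm', 'l'] (by decide) (by decide) hj
    simp [hj, hy, hx, Bool.and_assoc]
  · simp [hj]
theorem pvB4_eq (q : String) : pvIsClassicWf q = pvQ4 q := by
  simp only [pvIsClassicWf, pvQ4, pvA0, pvA1, pvA2, pvA3, pvA4, PySem.Str.endswith_eq, PySem.Str.isIn_eq]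
  by_cases hx : PySem.Chars.endswith q.toList ['.', 'x', 'a', 'm', 'l'] = true
  · have hy := pvSuffix_disj q.toList _ ['.', 'y', 'a', 'm', 'l'] (by decide) (by decide) hx
    have hj := pvSuffix_disj q.toList _ ['.', 'j', 's', 'o', 'n'] (by decide) (by decide) hx
    by_cases hf : PySem.Chars.isIn ['f', 'o', 'r', 'm', 'u', 'l', 'a', 's', '/'] q.toList = true <;>
    simp [hx, hy, hj, hf]
  · simp [hx]
theorem pvB5_eq (q : String) :
    (!(pvBuckets.any (fun pred => pred q))) = pvQ5 q := by
  simp only [pvBuckets, List.any_cons, List.any_nil,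
    pvB0_eq, pvB1_eq, pvB2_eq, pvB3_eq, pvB4_eq]
  by_cases h0 : pvA0 q = true <;>
  by_cases h1 : pvA1 q = true <;>
  by_cases h2 : pvA2 q = true <;>
  by_cases h3 : pvA3 q = true <;>
  by_cases h4 : pvA4 q = true <;>
  simp [pvQ0, pvQ1, pvQ2, pvQ3, pvQ4, pvQ5, h0, h1, h2, h3, h4]

-- ===== VERDICT =====
theorem separate_critical_files_py_spec : Claim_equal_separate_critical_files_py := by
  intro xs _
  show separate_critical_files_py xs = separate_critical_files_py_alt xs
  unfold separate_critical_files_py separate_critical_files_py_alt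
  simp only [pvFoldA, List.nil_append]
  refine congrArg₂ Prod.mk ?_ ?_
  · simp only [pvBuckets, List.flatMap_cons, List.flatMap_nil, List.append_nil, pvTagged,
      List.append_assoc]
    refine congrArg₂ _ (List.filter_congr fun pc _ => by rw [pvB0_eq]) ?_
    refine congrArg₂ _ (List.filter_congr fun pc _ => by rw [pvB1_eq]) ?_
    refine congrArg₂ _ (List.filter_congr fun pc _ => by rw [pvB2_eq]) ?_
    refine congrArg₂ _ (List.filter_congr fun pc _ => by rw [pvB3_eq]) ?_
    exact List.filter_congr fun pc _ => by rw [pvB4_eq]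
  · exact (List.filter_congr fun pc _ => (pvB5_eq (PySem.Str.lower pc.1)).symm).trans
      (pvTagged xs (fun q => !(pvBuckets.any (fun pred => pred q)))).symm
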